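-- pv_equiv track=rewrite | github.com/what-the-study/what-the-algorithm | youngjoo/Programmers/PCCP/모의고사1/1번.py | solution
-- ===== SOURCE A (Python) =====
-- from collections import Counter, defaultdict
--
-- def solution(input_string):
--     original_counter = Counter(input_string)
--     counter = defaultdict(int)
--     alone = set()
--
--     for i in range(len(input_string) - 1):
--         char1, char2 = input_string[i], input_string[i + 1]
--
--         if char1 in alone:
--             continue
--
--         counter[char1] += 1
--
--         if char1 == char2:
--             continue
--
--         if counter[char1] < original_counter[char1]:
--             alone.add(char1)
--
--     return "".join(sorted(alone)) if alone else "N"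
-- ===== SOURCE B (Python) =====
-- def solution(input_string):
--     seen = set()
--     result = set()
--     prev = None
--     for ch in input_string:
--         if ch != prev:
--             if ch in seen:
--                 result.add(ch)
--             seen.add(ch)
--         prev = ch
--     return "".join(sorted(result)) if result else "N"
-- ===== Notes on version B (the rewrite author's own statement) =====
-- stated objective: simpler
-- what changed: Replaces A's Counter/defaultdict consecutive-count bookkeeping with a single scan that detects run starts (current char differs from the previous one) against a seen-set, collecting characters that start a second run.
import Mathlib
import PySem

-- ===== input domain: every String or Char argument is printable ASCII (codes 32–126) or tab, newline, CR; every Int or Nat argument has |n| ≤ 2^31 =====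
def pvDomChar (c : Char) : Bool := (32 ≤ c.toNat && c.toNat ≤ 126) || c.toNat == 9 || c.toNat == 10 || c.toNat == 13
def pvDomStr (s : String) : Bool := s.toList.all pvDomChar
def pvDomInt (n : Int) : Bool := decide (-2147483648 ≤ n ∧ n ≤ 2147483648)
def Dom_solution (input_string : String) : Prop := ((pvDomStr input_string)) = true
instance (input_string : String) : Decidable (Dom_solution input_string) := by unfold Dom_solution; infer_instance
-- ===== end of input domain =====

-- B replaces A's Counter/defaultdict count bookkeeping with a single scan that detects
-- run starts (current char differs from the previous one) against a seen-set: simpler, same one-pass cost.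

-- ===== PORT A =====
-- loop body of A's 'for i in range(len(input_string) - 1)'
def solutionStepA (cs : List Char) (original_counter : PySem.Dict Char Int)
    (st : PySem.Dict Char Int × PySem.Set Char) (i : Int) :
    PySem.Dict Char Int × PySem.Set Char :=
  if PySem.Set.contains st.2 (PySem.List.pyGetD cs i ' ') then st
  else
    if PySem.List.pyGetD cs i ' ' == PySem.List.pyGetD cs (i + 1) ' ' then
      (st.1.modify (PySem.List.pyGetD cs i ' ') 0 (· + 1), st.2)
    else if (st.1.modify (PySem.List.pyGetD cs i ' ') 0 (· + 1)).getD (PySem.List.pyGetD cs i ' ') 0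
        < original_counter.getD (PySem.List.pyGetD cs i ' ') 0 then
      (st.1.modify (PySem.List.pyGetD cs i ' ') 0 (· + 1), PySem.Set.add st.2 (PySem.List.pyGetD cs i ' '))
    else (st.1.modify (PySem.List.pyGetD cs i ' ') 0 (· + 1), st.2)


def solution (input_string : String) : String :=
  let cs := input_string.toList
  let st := (PySem.List.pyRange 0 ((cs.length : Int) - 1)).foldl
      (solutionStepA cs (PySem.Dict.counter cs)) (PySem.Dict.empty, PySem.Set.empty)
  if st.2 ≠ [] then String.ofList (PySem.List.sorted st.2 (fun x => x) false) else "N"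

-- ===== PORT B =====
-- loop body of B's 'for ch in input_string' with state (seen, result, prev)
def solutionStepB (st : PySem.Set Char × PySem.Set Char × Option Char) (ch : Char) :
    PySem.Set Char × PySem.Set Char × Option Char :=
  if some ch ≠ st.2.2 then
    (PySem.Set.add st.1 ch,
     (if PySem.Set.contains st.1 ch then PySem.Set.add st.2.1 ch else st.2.1), some ch)
  else (st.1, st.2.1, some ch)


def solution_alt (input_string : String) : String :=
  let st := input_string.toList.foldl solutionStepB
      (PySem.Set.empty, PySem.Set.empty, none)
  if st.2.1 ≠ [] then String.ofList (PySem.List.sorted st.2.1 (fun x => x) false) else "N"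

-- ===== PRECONDITION & SPEC =====
def Spec_solution (input_string : String) (out : String) : Prop := out = solution_alt input_string
instance (input_string : String) (out : String) : Decidable (Spec_solution input_string out) := by unfold Spec_solution; infer_instance

-- ===== CLAIM (what is proved, stated in full; the proofs are below) =====
def Claim_equal_solution : Prop := ∀ (input_string : String), Dom_solution input_string → Spec_solution input_string (solution input_string)

-- ===== LEMMAS AND PROOFS =====

theorem count_lt_iff_mem_drop (cs : List Char) (c : Char) (k : Nat) :
    (cs.take k).count c < cs.count c ↔ c ∈ cs.drop k := by
  conv_lhs => rw [← List.take_append_drop k cs]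
  rw [List.count_append]
  simp [List.count_pos_iff]


-- A's loop invariant after k iterations: membership in 'alone', the counter values, and Nodup
theorem aInv (cs : List Char) (k : Nat) (hk : k + 1 ≤ cs.length) :
    (∀ c, c ∈ ((List.range k).foldl
        (fun st (j : Nat) => solutionStepA cs (PySem.Dict.counter cs) st (j : Int)) (PySem.Dict.empty, PySem.Set.empty)).2 ↔
      ∃ i, i < k ∧ cs[i]? = some c ∧ cs[i+1]? ≠ some c ∧
        (cs.take (i+1)).count c < cs.count c) ∧
    (∀ c, c ∉ ((List.range k).foldl
        (fun st (j : Nat) => solutionStepA cs (PySem.Dict.counter cs) st (j : Int)) (PySem.Dict.empty, PySem.Set.empty)).2 →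
      ((List.range k).foldl
        (fun st (j : Nat) => solutionStepA cs (PySem.Dict.counter cs) st (j : Int)) (PySem.Dict.empty, PySem.Set.empty)).1.getD c 0
        = ((cs.take k).count c : Int)) ∧
    ((List.range k).foldl
        (fun st (j : Nat) => solutionStepA cs (PySem.Dict.counter cs) st (j : Int)) (PySem.Dict.empty, PySem.Set.empty)).2.Nodup := by
  induction k with
  | zero => simp [PySem.Set.empty, PySem.Dict.getD_empty]
  | succ k ih =>
    have hk1 : k + 1 < cs.length := hk
    have hkn : k < cs.length := Nat.lt_of_succ_lt hk1
    obtain ⟨ih1, ih2, ih3⟩ := ih (Nat.le_of_lt hk)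
    rw [List.range_succ, List.foldl_append, List.foldl_cons, List.foldl_nil]
    set st := ((List.range k).foldl
        (fun st (j : Nat) => solutionStepA cs (PySem.Dict.counter cs) st (j : Int)) (PySem.Dict.empty, PySem.Set.empty)) with hst
    have hchar1 : PySem.List.pyGetD cs (k : Int) ' ' = cs[k] := by
      rw [PySem.List.pyGetD_natCast, List.getD_eq_getElem _ _ hkn]
    have hchar2 : PySem.List.pyGetD cs ((k : Int) + 1) ' ' = cs[k+1] := by
      rw [show ((k : Int) + 1) = ((k+1 : Nat) : Int) by push_cast; ring,
        PySem.List.pyGetD_natCast, List.getD_eq_getElem _ _ hk1]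
    have htake : cs.take (k+1) = cs.take k ++ [cs[k]] := by
      rw [List.take_add_one]; simp [List.getElem?_eq_getElem hkn]
    have hcount : ∀ c : Char, (cs.take (k+1)).count c
        = (cs.take k).count c + (if cs[k] = c then 1 else 0) := by
      intro c; rw [htake, List.count_append]
      by_cases h : cs[k] = c <;> simp [h]
    have hnosucc : ∀ c : Char,
        (∃ i, i < k ∧ cs[i]? = some c ∧ cs[i+1]? ≠ some c ∧ (cs.take (i+1)).count c < cs.count c) →
        (∃ i, i < k + 1 ∧ cs[i]? = some c ∧ cs[i+1]? ≠ some c ∧ (cs.take (i+1)).count c < cs.count c) := by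
      rintro c ⟨i, h1, h2, h3, h4⟩
      exact ⟨i, Nat.lt_succ_of_lt h1, h2, h3, h4⟩
    unfold solutionStepA
    rw [hchar1, hchar2]
    by_cases halone : PySem.Set.contains st.2 cs[k] = true
    · rw [if_pos halone]
      have hmem : cs[k] ∈ st.2 := (PySem.Set.contains_iff _ _).mp halone
      refine ⟨?_, ?_, ih3⟩
      · intro c
        rw [ih1]
        constructor
        · exact hnosucc _
        · rintro ⟨i, h1, h2, h3, h4⟩
          rcases Nat.lt_succ_iff_lt_or_eq.mp h1 with hi | rfl
          · exact ⟨i, hi, h2, h3, h4⟩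
          · rw [List.getElem?_eq_getElem hkn] at h2
            have hc := Option.some_injective _ h2
            subst hc
            exact (ih1 _).mp hmem
      · intro c hc
        rw [ih2 c hc, hcount c, if_neg, Nat.add_zero]
        intro h; rw [h] at hmem; exact hc hmem
    · rw [if_neg halone]
      have hnotmem : cs[k] ∉ st.2 := fun h => halone ((PySem.Set.contains_iff _ _).mpr h)
      have hcnt1 : st.1.getD cs[k] 0 = ((cs.take k).count cs[k] : Int) := ih2 _ hnotmem
      have hgetD : ∀ c : Char, (st.1.modify cs[k] 0 (· + 1)).getD c 0
          = if c = cs[k] then st.1.getD cs[k] 0 + 1 else st.1.getD c 0 :=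
        fun c => PySem.Dict.getD_modify st.1 cs[k] c 0 (· + 1)
      have hcnt' : (st.1.modify cs[k] 0 (· + 1)).getD cs[k] 0
          = ((cs.take (k+1)).count cs[k] : Int) := by
        rw [hgetD, if_pos rfl, hcnt1, hcount, if_pos rfl]; push_cast; ring
      have hgetD2 : ∀ c, c ∉ st.2 → (st.1.modify cs[k] 0 (· + 1)).getD c 0
          = ((cs.take (k+1)).count c : Int) := by
        intro c hc
        by_cases hceq : c = cs[k]
        · rw [hceq]; exact hcnt'
        · rw [hgetD, if_neg hceq, ih2 c hc, hcount, if_neg (fun h => hceq h.symm), Nat.add_zero]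
      by_cases heq : (cs[k] == cs[k+1]) = true
      · rw [if_pos heq]
        have heq' : cs[k] = cs[k+1] := beq_iff_eq.mp heq
        refine ⟨?_, fun c hc => hgetD2 c hc, ih3⟩
        intro c
        rw [ih1]
        constructor
        · exact hnosucc _
        · rintro ⟨i, h1, h2, h3, h4⟩
          rcases Nat.lt_succ_iff_lt_or_eq.mp h1 with hi | rfl
          · exact ⟨i, hi, h2, h3, h4⟩
          · exfalso
            rw [List.getElem?_eq_getElem hkn] at h2
            rw [List.getElem?_eq_getElem hk1] at h3
            exact h3 (by rw [← heq', h2])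
      · rw [if_neg heq]
        have hne : cs[k] ≠ cs[k+1] := fun h => heq (beq_iff_eq.mpr h)
        have hoc : (PySem.Dict.counter cs).getD cs[k] 0 = (cs.count cs[k] : Int) :=
          PySem.Dict.getD_counter cs cs[k]
        by_cases hlt : (st.1.modify cs[k] 0 (· + 1)).getD cs[k] 0
            < (PySem.Dict.counter cs).getD cs[k] 0
        · rw [if_pos hlt]
          have hltn : (cs.take (k+1)).count cs[k] < cs.count cs[k] := by
            rw [hcnt', hoc] at hlt; exact_mod_cast hlt
          refine ⟨?_, ?_, PySem.Set.nodup_add _ _ ih3⟩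
          · intro c
            rw [PySem.Set.mem_add, ih1]
            constructor
            · rintro (h | rfl)
              · exact hnosucc _ h
              · refine ⟨k, Nat.lt_succ_self k, List.getElem?_eq_getElem hkn, ?_, hltn⟩
                rw [List.getElem?_eq_getElem hk1]
                exact fun h => hne (Option.some_injective _ h).symm
            · rintro ⟨i, h1, h2, h3, h4⟩
              rcases Nat.lt_succ_iff_lt_or_eq.mp h1 with hi | rfl
              · exact Or.inl ⟨i, hi, h2, h3, h4⟩
              · right
                rw [List.getElem?_eq_getElem hkn] at h2
                exact (Option.some_injective _ h2).symm
          · intro c hc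
            rw [PySem.Set.mem_add] at hc
            have hc' : c ∉ st.2 := fun h => hc (Or.inl h)
            exact hgetD2 c hc'
        · rw [if_neg hlt]
          have hge : ¬ (cs.take (k+1)).count cs[k] < cs.count cs[k] := by
            intro h
            exact hlt (by rw [hcnt', hoc]; exact_mod_cast h)
          refine ⟨?_, fun c hc => hgetD2 c hc, ih3⟩
          intro c
          rw [ih1]
          constructor
          · exact hnosucc _
          · rintro ⟨i, h1, h2, h3, h4⟩
            rcases Nat.lt_succ_iff_lt_or_eq.mp h1 with hi | rfl
            · exact ⟨i, hi, h2, h3, h4⟩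
            · exfalso
              rw [List.getElem?_eq_getElem hkn] at h2
              have hc := Option.some_injective _ h2
              subst hc
              exact hge h4

-- B's loop invariant after the first k characters: 'seen', 'result', 'prev', and Nodup
theorem bInv (cs : List Char) (k : Nat) (hk : k ≤ cs.length) :
    (∀ c, c ∈ ((cs.take k).foldl solutionStepB (PySem.Set.empty, PySem.Set.empty, none)).1 ↔
        c ∈ cs.take k) ∧
    (∀ c, c ∈ ((cs.take k).foldl solutionStepB (PySem.Set.empty, PySem.Set.empty, none)).2.1 ↔
      ∃ j, 0 < j ∧ j < k ∧ cs[j]? = some c ∧ cs[j-1]? ≠ some c ∧ c ∈ cs.take j) ∧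
    (((cs.take k).foldl solutionStepB (PySem.Set.empty, PySem.Set.empty, none)).2.2
        = if k = 0 then none else cs[k-1]?) ∧
    ((cs.take k).foldl solutionStepB (PySem.Set.empty, PySem.Set.empty, none)).2.1.Nodup := by
  induction k with
  | zero => simp [PySem.Set.empty]
  | succ k ih =>
    have hkn : k < cs.length := hk
    obtain ⟨ih1, ih2, ih3, ih4⟩ := ih (Nat.le_of_lt hkn)
    have hstep : cs.take (k+1) = cs.take k ++ [cs[k]] := by
      rw [List.take_add_one]; simp [List.getElem?_eq_getElem hkn]
    rw [hstep, List.foldl_append, List.foldl_cons, List.foldl_nil]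
    set st := (cs.take k).foldl solutionStepB (PySem.Set.empty, PySem.Set.empty, none) with hst
    have hmem_or : ∀ c : Char, c ∈ cs.take k ++ [cs[k]] ↔ c ∈ cs.take k ∨ c = cs[k] := by
      intro c; rw [List.mem_append, List.mem_singleton]
    have hnosucc : ∀ c : Char,
        (∃ j, 0 < j ∧ j < k ∧ cs[j]? = some c ∧ cs[j-1]? ≠ some c ∧ c ∈ cs.take j) →
        (∃ j, 0 < j ∧ j < k + 1 ∧ cs[j]? = some c ∧ cs[j-1]? ≠ some c ∧ c ∈ cs.take j) := by
      rintro c ⟨j, h1, h2, h3, h4, h5⟩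
      exact ⟨j, h1, Nat.lt_succ_of_lt h2, h3, h4, h5⟩
    unfold solutionStepB
    by_cases hcond : some cs[k] ≠ st.2.2
    · rw [if_pos hcond]
      refine ⟨?_, ?_, by simp [List.getElem?_eq_getElem hkn], ?_⟩
      · intro c
        rw [PySem.Set.mem_add, ih1, hmem_or]
      · intro c
        by_cases hseen : PySem.Set.contains st.1 cs[k] = true
        · have hmemk : cs[k] ∈ cs.take k := (ih1 _).1 ((PySem.Set.contains_iff _ _).mp hseen)
          have hkpos : 0 < k := by
            rcases Nat.eq_zero_or_pos k with h0 | h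
            · subst h0; simp at hmemk
            · exact h
          have hprev : cs[k-1]? ≠ some cs[k] := by
            rw [ih3, if_neg (Nat.pos_iff_ne_zero.mp hkpos)] at hcond
            exact fun h => hcond h.symm
          simp only [hseen, if_pos, PySem.Set.mem_add, ih2]
          constructor
          · rintro (h | rfl)
            · exact hnosucc _ h
            · exact ⟨k, hkpos, Nat.lt_succ_self k, List.getElem?_eq_getElem hkn, hprev, hmemk⟩
          · rintro ⟨j, h1, h2, h3, h4, h5⟩
            rcases Nat.lt_succ_iff_lt_or_eq.mp h2 with hj | rfl
            · exact Or.inl ⟨j, h1, hj, h3, h4, h5⟩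
            · right
              rw [List.getElem?_eq_getElem hkn] at h3
              exact (Option.some_injective _ h3).symm
        · have hnotmem : cs[k] ∉ cs.take k := fun h =>
            hseen ((PySem.Set.contains_iff _ _).mpr ((ih1 _).2 h))
          simp only [hseen, if_neg, Bool.false_eq_true, not_false_iff, ih2]
          constructor
          · exact hnosucc _
          · rintro ⟨j, h1, h2, h3, h4, h5⟩
            rcases Nat.lt_succ_iff_lt_or_eq.mp h2 with hj | rfl
            · exact ⟨j, h1, hj, h3, h4, h5⟩
            · rw [List.getElem?_eq_getElem hkn] at h3
              exact absurd h5 (by rw [← Option.some_injective _ h3]; exact hnotmem)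
      · by_cases hseen : PySem.Set.contains st.1 cs[k] = true
        · have hm : cs[k] ∈ st.1 := (PySem.Set.contains_iff _ _).mp hseen
          simpa [hm] using PySem.Set.nodup_add _ _ ih4
        · have hm : cs[k] ∉ st.1 := fun h => hseen ((PySem.Set.contains_iff _ _).mpr h)
          simpa [hm] using ih4
    · rw [if_neg hcond]
      rw [ne_eq, not_not] at hcond
      have hkpos : 0 < k := by
        rcases Nat.eq_zero_or_pos k with h0 | h
        · exfalso; rw [ih3, if_pos h0] at hcond; exact Option.some_ne_none _ hcond
        · exact h
      have hprev : cs[k-1]? = some cs[k] := by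
        rw [ih3, if_neg (Nat.pos_iff_ne_zero.mp hkpos)] at hcond; exact hcond.symm
      have hmemk : cs[k] ∈ cs.take k :=
        List.mem_of_getElem? (by rw [List.getElem?_take_of_lt (by omega : k - 1 < k)]; exact hprev)
      refine ⟨?_, ?_, by simp [List.getElem?_eq_getElem hkn], ih4⟩
      · intro c
        rw [ih1, hmem_or]
        constructor
        · exact Or.inl
        · rintro (h | rfl)
          · exact h
          · exact hmemk
      · intro c
        rw [ih2]
        constructor
        · exact hnosucc _
        · rintro ⟨j, h1, h2, h3, h4, h5⟩
          rcases Nat.lt_succ_iff_lt_or_eq.mp h2 with hj | rfl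
          · exact ⟨j, h1, hj, h3, h4, h5⟩
          · rw [List.getElem?_eq_getElem hkn] at h3
            exact absurd (hprev.trans (by rw [Option.some_injective _ h3])) h4

-- the two characterizations describe the same characters (those occurring in ≥ 2 maximal runs)
theorem cond_equiv (cs : List Char) (c : Char) :
    (∃ i, i < cs.length - 1 ∧ cs[i]? = some c ∧ cs[i+1]? ≠ some c ∧
        (cs.take (i+1)).count c < cs.count c) ↔
    (∃ j, 0 < j ∧ j < cs.length ∧ cs[j]? = some c ∧ cs[j-1]? ≠ some c ∧ c ∈ cs.take j) := by
  constructor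
  · rintro ⟨i, h1, h2, h3, h4⟩
    rw [count_lt_iff_mem_drop] at h4
    have hP : ∃ m, i + 1 ≤ m ∧ cs[m]? = some c := by
      obtain ⟨m, hm, he⟩ := List.getElem_of_mem h4
      exact ⟨i + 1 + m, by omega, by rw [← List.getElem?_drop, List.getElem?_eq_getElem hm, he]⟩
    classical
    obtain ⟨j, ⟨hj1, hj2⟩, hjmin⟩ :
        ∃ j, (i + 1 ≤ j ∧ cs[j]? = some c) ∧ ∀ j' < j, ¬(i + 1 ≤ j' ∧ cs[j']? = some c) :=
      ⟨Nat.find hP, Nat.find_spec hP, fun _ h => Nat.find_min hP h⟩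
    have hjne : j ≠ i + 1 := fun h => h3 (by rw [← h]; exact hj2)
    have hjlt : j < cs.length := by
      by_contra hge
      rw [List.getElem?_eq_none (by omega)] at hj2
      cases hj2
    refine ⟨j, by omega, hjlt, hj2, ?_, ?_⟩
    · intro hjc
      exact hjmin (j - 1) (by omega) ⟨by omega, hjc⟩
    · exact List.mem_of_getElem? (by
        rw [List.getElem?_take_of_lt (show i < j by omega)]; exact h2)
  · rintro ⟨j, h1, h2, h3, h4, h5⟩
    have hme : ∃ m, m < j ∧ cs[m]? = some c := by
      obtain ⟨m, hm, he⟩ := List.getElem_of_mem h5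
      have hmj : m < j := lt_of_lt_of_le hm (by simp)
      refine ⟨m, hmj, ?_⟩
      rw [← he, List.getElem_take]
      exact List.getElem?_eq_getElem _
    obtain ⟨m, hmj, hmc⟩ := hme
    classical
    have hP : ∃ f, cs[j - 1 - f]? = some c := ⟨j - 1 - m, by
      have h' : j - 1 - (j - 1 - m) = m := by omega
      rw [h']; exact hmc⟩
    have hmm : j - 1 - (j - 1 - m) = m := by omega
    obtain ⟨f, hfspec, hfmin, hfle⟩ :
        ∃ f, cs[j - 1 - f]? = some c ∧ (∀ g, g < f → cs[j - 1 - g]? ≠ some c) ∧ f ≤ j - 1 - m :=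
      ⟨Nat.find hP, Nat.find_spec hP, fun g hg => Nat.find_min hP hg,
        Nat.find_le (by rw [hmm]; exact hmc)⟩
    have hine : j - 1 - f ≠ j - 1 := by
      intro h; rw [h] at hfspec; exact h4 hfspec
    have hfpos : 0 < f := by omega
    refine ⟨j - 1 - f, by omega, hfspec, ?_, ?_⟩
    · have : j - 1 - f + 1 = j - 1 - (f - 1) := by omega
      rw [this]
      exact hfmin (f - 1) (by omega)
    · rw [count_lt_iff_mem_drop]
      exact List.mem_of_getElem? (by
        rw [List.getElem?_drop]
        have h' : j - 1 - f + 1 + (j - (j - 1 - f + 1)) = j := by omega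
        rw [h']; exact h3)

theorem solution_eq_alt (input_string : String) :
    solution input_string = solution_alt input_string := by
  have hsolA : solution input_string =
      (if ((PySem.List.pyRange 0 ((input_string.toList.length : Int) - 1)).foldl
          (solutionStepA input_string.toList (PySem.Dict.counter input_string.toList))
          (PySem.Dict.empty, PySem.Set.empty)).2 ≠ [] then
        String.ofList (PySem.List.sorted ((PySem.List.pyRange 0 ((input_string.toList.length : Int) - 1)).foldl
          (solutionStepA input_string.toList (PySem.Dict.counter input_string.toList))
          (PySem.Dict.empty, PySem.Set.empty)).2 (fun x => x) false)
      else "N") := rfl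
  have hsolB : solution_alt input_string =
      (if (input_string.toList.foldl solutionStepB (PySem.Set.empty, PySem.Set.empty, none)).2.1 ≠ [] then
        String.ofList (PySem.List.sorted
          (input_string.toList.foldl solutionStepB (PySem.Set.empty, PySem.Set.empty, none)).2.1
          (fun x => x) false)
      else "N") := rfl
  rw [hsolA, hsolB]
  rcases Nat.eq_zero_or_pos input_string.toList.length with hn | hn
  · have hnil : input_string.toList = [] := List.eq_nil_of_length_eq_zero hn
    rw [hnil]
    decide
  · set cs := input_string.toList with hcs
    have hcast : ((cs.length : Int) - 1) = ((cs.length - 1 : Nat) : Int) := by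
      push_cast [Nat.cast_sub hn]; ring
    rw [hcast, PySem.List.pyRange_zero_natCast, List.foldl_map]
    obtain ⟨a1, _, a3⟩ := aInv cs (cs.length - 1) (by omega)
    obtain ⟨_, b2, _, b4⟩ := bInv cs cs.length (le_refl _)
    rw [List.take_length] at b2 b4
    have hiff : ∀ c, c ∈ (((List.range (cs.length - 1)).foldl
        (fun st (j : Nat) => solutionStepA cs (PySem.Dict.counter cs) st (j : Int))
        (PySem.Dict.empty, PySem.Set.empty))).2 ↔
        c ∈ (cs.foldl solutionStepB (PySem.Set.empty, PySem.Set.empty, none)).2.1 := by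
      intro c
      rw [a1, b2, ← cond_equiv]
    have hperm := (List.perm_ext_iff_of_nodup a3 b4).mpr hiff
    have hsorted := (PySem.List.sorted_id_eq_sorted_id_iff_perm _ _).mpr hperm
    by_cases hA : (((List.range (cs.length - 1)).foldl
        (fun st (j : Nat) => solutionStepA cs (PySem.Dict.counter cs) st (j : Int))
        (PySem.Dict.empty, PySem.Set.empty))).2 = []
    · rw [hA] at hperm
      rw [if_neg (by simpa using hA), if_neg (by simpa using hperm.symm.eq_nil)]
    · have hB : (cs.foldl solutionStepB (PySem.Set.empty, PySem.Set.empty, none)).2.1 ≠ [] := by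
        intro h; rw [h] at hperm; exact hA hperm.eq_nil
      rw [if_pos (by simpa using hA), if_pos (by simpa using hB)]
      rw [hsorted]

-- ===== VERDICT (by name: the statement is the Claim_ definition above) =====
theorem solution_spec : Claim_equal_solution := by
  intro input_string _
  unfold Spec_solution
  exact solution_eq_alt input_string
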